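-- pv_equiv track=rewrite | github.com/JodieRuth/Pig-God-Bot | command/help.py | chunked_forward_lines
-- ===== SOURCE A (Python) =====
-- HELP_SECTION_SIZE = 10
--
-- def chunked_forward_lines(lines: list[str], chunk_size: int = HELP_SECTION_SIZE) -> list[str]:
--     if not lines:
--         return []
--     result: list[str] = []
--     current: list[str] = []
--     for line in lines:
--         if not line:
--             if current:
--                 result.extend(current)
--                 result.append("")
--                 current = []
--             continue
--         current.append(line)
--         if len(current) >= chunk_size:
--             result.extend(current)
--             result.append("")
--             current = []
--     if current:
--         result.extend(current)
--     while result and not result[-1]: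
--         result.pop()
--     return result
-- ===== SOURCE B (Python) =====
-- HELP_SECTION_SIZE = 10
--
-- def chunked_forward_lines(lines: list[str], chunk_size: int = HELP_SECTION_SIZE) -> list[str]:
--     step = chunk_size if chunk_size > 1 else 1
--     # phase 1: split into maximal runs of non-blank lines
--     runs = []
--     run = []
--     for line in lines:
--         if line:
--             run.append(line)
--         elif run:
--             runs.append(run)
--             run = []
--     if run:
--         runs.append(run)
--     # phase 2: cut each run into pieces of at most `step` lines
--     chunks = []
--     for run in runs:
--         while len(run) > step:
--             chunks.append(run[:step])
--             run = run[step:]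
--         chunks.append(run)
--     # phase 3: join chunks with a single blank separator (never trailing)
--     out = []
--     for chunk in chunks:
--         if out:
--             out.append("")
--         out.extend(chunk)
--     return out
-- ===== Notes on version B (the rewrite author's own statement) =====
-- stated objective: alternative
-- what changed: A interleaves chunk flushing, separator emission and a final trailing-blank strip in one stateful pass; B decomposes the task into three phases: split the lines into maximal non-blank runs, cut each run into slices of at most chunk_size lines, then join the slices with a single blank separator so no trailing blank is ever produced.
import Mathlib
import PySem

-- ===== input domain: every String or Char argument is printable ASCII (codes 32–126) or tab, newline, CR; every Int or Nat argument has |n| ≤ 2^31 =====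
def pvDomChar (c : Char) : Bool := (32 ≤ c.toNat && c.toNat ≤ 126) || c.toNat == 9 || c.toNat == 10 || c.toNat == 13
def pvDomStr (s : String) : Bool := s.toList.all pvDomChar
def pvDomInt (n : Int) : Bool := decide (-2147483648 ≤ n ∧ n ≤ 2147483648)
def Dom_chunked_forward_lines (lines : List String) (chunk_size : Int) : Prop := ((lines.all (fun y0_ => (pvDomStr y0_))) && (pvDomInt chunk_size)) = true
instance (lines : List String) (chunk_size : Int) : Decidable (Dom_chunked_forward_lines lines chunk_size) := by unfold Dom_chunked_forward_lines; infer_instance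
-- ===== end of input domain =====

-- B re-decomposes A's single stateful pass as runs → fixed-size slices → join-with-one-separator
-- (objective: alternative decomposition, same cost).

-- ===== PORT A =====
-- `while result and not result[-1]: result.pop()`
def popTrail (xs : List String) : List String :=
  if xs.getLast? = some "" then popTrail xs.dropLast else xs
termination_by xs.length
decreasing_by
  cases xs with
  | nil => simp at *
  | cons a l => simp [List.length_dropLast]

-- A's loop body: (result, current) → next state
def fA (chunk_size : Int) (s : List String × List String) (line : String) : List String × List String :=
  if line = "" then
    if s.2 ≠ [] then (s.1 ++ s.2 ++ [""], ([] : List String)) else s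
  else
    let cur := s.2 ++ [line]
    if (cur.length : Int) ≥ chunk_size then (s.1 ++ cur ++ [""], ([] : List String)) else (s.1, cur)

def chunked_forward_lines (lines : List String) (chunk_size : Int) : List String :=
  if lines = [] then []
  else
    let st := lines.foldl (fA chunk_size) ([], [])
    let result := if st.2 ≠ [] then st.1 ++ st.2 else st.1
    popTrail result

-- ===== PORT B =====
-- `while len(run) > step: chunks.append(run[:step]); run = run[step:]` then `chunks.append(run)`;
-- the `step = 0` disjunct only makes the recursion total (B always calls it with step ≥ 1).
def altChunkRun (step : Nat) (run : List String) : List (List String) :=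
  if run.length ≤ step ∨ step = 0 then [run]
  else run.take step :: altChunkRun step (run.drop step)
termination_by run.length
decreasing_by simp at *; omega

-- B's phase-1 loop body: (runs, run) → next state
def gB (s : List (List String) × List String) (line : String) : List (List String) × List String :=
  if line ≠ "" then (s.1, s.2 ++ [line])
  else if s.2 ≠ [] then (s.1 ++ [s.2], ([] : List String)) else s

-- B's phase-3 loop body: one blank separator before every chunk except the first
def joinF (out : List String) (c : List String) : List String :=
  (if out ≠ [] then out ++ [""] else out) ++ c

def chunked_forward_lines_alt (lines : List String) (chunk_size : Int) : List String :=
  let step : Nat := if chunk_size > 1 then chunk_size.toNat else 1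
  let st := lines.foldl gB (([] : List (List String)), ([] : List String))
  let runs := if st.2 ≠ [] then st.1 ++ [st.2] else st.1
  let chunks := runs.foldl (fun acc run => acc ++ altChunkRun step run) []
  chunks.foldl joinF []

-- ===== PRECONDITION & SPEC =====
def Spec_chunked_forward_lines (lines : List String) (chunk_size : Int) (out : List String) : Prop := out = chunked_forward_lines_alt lines chunk_size
instance (lines : List String) (chunk_size : Int) (out : List String) : Decidable (Spec_chunked_forward_lines lines chunk_size out) := by unfold Spec_chunked_forward_lines; infer_instance

-- ===== CLAIM (what is proved, stated in full; the proofs are below) =====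
def Claim_equal_chunked_forward_lines : Prop := ∀ (lines : List String) (chunk_size : Int), Dom_chunked_forward_lines lines chunk_size → Spec_chunked_forward_lines lines chunk_size (chunked_forward_lines lines chunk_size)

-- ===== LEMMAS AND PROOFS =====

-- recursive mirror of A's fold: the chunks flushed so far, and the pending partial chunk
def loopC (n : Int) : List String → List String → List (List String) × List String
  | [], cur => ([], cur)
  | l :: ls, cur =>
    if l = "" then
      if cur ≠ [] then (cur :: (loopC n ls []).1, (loopC n ls []).2) else loopC n ls cur
    else
      if ((cur.length + 1 : Int) ≥ n) then ((cur ++ [l]) :: (loopC n ls []).1, (loopC n ls []).2)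
      else loopC n ls (cur ++ [l])

-- recursive mirror of B's runs fold
def runsC : List String → List String → List (List String) × List String
  | [], run => ([], run)
  | l :: ls, run =>
    if l ≠ "" then runsC ls (run ++ [l])
    else if run ≠ [] then (run :: (runsC ls []).1, (runsC ls []).2) else runsC ls run

def optWrap (c : List String) : List (List String) := if c = [] then [] else [c]
def flatTrail (cs : List (List String)) : List String := cs.flatMap (fun c => c ++ [""])
def joinSep : List (List String) → List String
  | [] => []
  | c :: cs => c ++ cs.flatMap (fun d => "" :: d)
def sl (step : Nat) (x : List String) : List (List String) := if x = [] then [] else altChunkRun step x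
def chunksFrom (n : Int) (ls cur : List String) : List (List String) :=
  (loopC n ls cur).1 ++ optWrap (loopC n ls cur).2
def runsFrom (ls run : List String) : List (List String) :=
  (runsC ls run).1 ++ optWrap (runsC ls run).2
def stepOf (n : Int) : Nat := if n > 1 then n.toNat else 1

theorem stepOf_pos (n : Int) : 1 ≤ stepOf n := by unfold stepOf; split <;> omega

-- A's fold = loopC
theorem foldA_eq (n : Int) : ∀ (ls : List String) (R cur : List String),
    ls.foldl (fA n) (R, cur)
    = (R ++ flatTrail (loopC n ls cur).1, (loopC n ls cur).2) := by
  intro ls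
  induction ls with
  | nil => intro R cur; simp [loopC, flatTrail]
  | cons l ls ih =>
    intro R cur
    rw [List.foldl_cons]
    by_cases hl : l = ""
    · by_cases hc : cur = []
      · rw [show fA n (R, cur) l = (R, cur) from by simp [fA, hl, hc]]
        rw [ih R cur]
        simp [loopC, hl, hc]
      · rw [show fA n (R, cur) l = (R ++ cur ++ [""], []) from by simp [fA, hl, hc]]
        rw [ih]
        simp [loopC, hl, hc, flatTrail, List.append_assoc]
    · by_cases ht : ((cur.length + 1 : Int) ≥ n)
      · rw [show fA n (R, cur) l = (R ++ (cur ++ [l]) ++ [""], []) from by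
          simp only [fA, if_neg hl]
          rw [if_pos (by simpa using ht)]]
        rw [ih]
        have e1 : (loopC n (l :: ls) cur).1 = (cur ++ [l]) :: (loopC n ls []).1 := by
          simp only [loopC, if_neg hl]; rw [if_pos ht]
        have e2 : (loopC n (l :: ls) cur).2 = (loopC n ls []).2 := by
          simp only [loopC, if_neg hl]; rw [if_pos ht]
        rw [e1, e2]
        simp [flatTrail, List.append_assoc]
      · rw [show fA n (R, cur) l = (R, cur ++ [l]) from by
          simp only [fA, if_neg hl]
          rw [if_neg (by simpa using ht)]]
        rw [ih]
        have e : loopC n (l :: ls) cur = loopC n ls (cur ++ [l]) := by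
          simp only [loopC, if_neg hl]; rw [if_neg ht]
        rw [e]

-- invariants of loopC: chunks nonempty with nonblank lines, pending chunk nonblank
theorem loopC_inv (n : Int) : ∀ (ls cur : List String), (∀ x ∈ cur, x ≠ "") →
    ((∀ c ∈ (loopC n ls cur).1, c ≠ [] ∧ ∀ x ∈ c, x ≠ "") ∧ ∀ x ∈ (loopC n ls cur).2, x ≠ "") := by
  intro ls
  induction ls with
  | nil => intro cur h; simpa [loopC] using h
  | cons l ls ih =>
    intro cur h
    by_cases hl : l = ""
    · by_cases hc : cur = []
      · simpa [loopC, hl, hc] using ih cur h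
      · have hrec := ih [] (by simp)
        have e1 : (loopC n (l :: ls) cur).1 = cur :: (loopC n ls []).1 := by
          simp [loopC, hl, hc]
        have e2 : (loopC n (l :: ls) cur).2 = (loopC n ls []).2 := by
          simp [loopC, hl, hc]
        rw [e1, e2]
        refine ⟨?_, hrec.2⟩
        intro c hcm
        rcases List.mem_cons.1 hcm with rfl | hm
        · exact ⟨hc, h⟩
        · exact hrec.1 c hm
    · have hcur : ∀ x ∈ cur ++ [l], x ≠ "" := by
        intro x hx; rcases List.mem_append.1 hx with h1 | h1
        · exact h x h1
        · simp at h1; simpa [h1] using hl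
      by_cases ht : ((cur.length + 1 : Int) ≥ n)
      · have hrec := ih [] (by simp)
        have e1 : (loopC n (l :: ls) cur).1 = (cur ++ [l]) :: (loopC n ls []).1 := by
          simp only [loopC, if_neg hl]; rw [if_pos ht]
        have e2 : (loopC n (l :: ls) cur).2 = (loopC n ls []).2 := by
          simp only [loopC, if_neg hl]; rw [if_pos ht]
        rw [e1, e2]
        refine ⟨?_, hrec.2⟩
        intro c hcm
        rcases List.mem_cons.1 hcm with rfl | hm
        · exact ⟨by simp, hcur⟩
        · exact hrec.1 c hm
      · have e : loopC n (l :: ls) cur = loopC n ls (cur ++ [l]) := by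
          simp only [loopC, if_neg hl]; rw [if_neg ht]
        rw [e]
        exact ih (cur ++ [l]) hcur

theorem popTrail_of_last_ne (xs : List String) (h : xs.getLast? ≠ some "") : popTrail xs = xs := by
  rw [popTrail]; simp [h]

theorem popTrail_concat_blank (ys : List String) : popTrail (ys ++ [""]) = popTrail ys := by
  rw [popTrail]; simp

theorem flatMap_sep_concat (cs : List (List String)) (c : List String) :
    cs.flatMap (fun d => "" :: d) ++ "" :: c = "" :: (flatTrail cs ++ c) := by
  induction cs with
  | nil => simp [flatTrail]
  | cons d cs ih =>
    simp only [List.flatMap_cons, List.cons_append, List.append_assoc]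
    rw [ih]
    simp [flatTrail]

theorem joinSep_concat (cs : List (List String)) (c : List String) :
    joinSep (cs ++ [c]) = flatTrail cs ++ c := by
  cases cs with
  | nil => simp [joinSep, flatTrail]
  | cons c0 cs =>
    simp only [List.cons_append, joinSep, List.flatMap_append, List.flatMap_cons, List.flatMap_nil,
      List.append_nil, List.append_assoc]
    rw [flatMap_sep_concat]
    simp [flatTrail]

theorem flatTrail_eq (cs : List (List String)) (h : cs ≠ []) :
    flatTrail cs = joinSep cs ++ [""] := by
  induction cs with
  | nil => simp at h
  | cons c cs ih =>
    cases cs with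
    | nil => simp [flatTrail, joinSep]
    | cons d cs' =>
      simp only [flatTrail, List.flatMap_cons, joinSep] at *
      simp [ih, joinSep, flatTrail]

theorem joinSep_getLast (cs : List (List String)) (hne : cs ≠ [])
    (h : ∀ c ∈ cs, c ≠ [] ∧ ∀ x ∈ c, x ≠ "") : (joinSep cs).getLast? ≠ some "" := by
  induction cs using List.reverseRecOn with
  | nil => simp at hne
  | append_singleton cs c _ =>
    rw [joinSep_concat]
    have hc := h c (by simp)
    rw [List.getLast?_append_of_ne_nil _ hc.1]
    intro hcontra
    exact hc.2 "" (List.mem_of_getLast? hcontra) rfl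

-- A's port = joinSep of its chunk list
theorem A_char (lines : List String) (n : Int) (h : lines ≠ []) :
    chunked_forward_lines lines n = joinSep (chunksFrom n lines []) := by
  unfold chunked_forward_lines
  rw [if_neg h, foldA_eq n lines [] []]
  simp only [List.nil_append]
  have inv := loopC_inv n lines [] (by simp)
  by_cases h2 : (loopC n lines []).2 = []
  · have hch : chunksFrom n lines [] = (loopC n lines []).1 := by
      simp [chunksFrom, optWrap, h2]
    rw [hch, if_neg (not_not_intro h2)]
    by_cases h1 : (loopC n lines []).1 = []
    · rw [h1]
      simp only [flatTrail, List.flatMap_nil, joinSep]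
      rw [popTrail]
      simp
    · rw [flatTrail_eq _ h1, popTrail_concat_blank,
        popTrail_of_last_ne _ (joinSep_getLast _ h1 inv.1)]
  · have hch : chunksFrom n lines [] = (loopC n lines []).1 ++ [(loopC n lines []).2] := by
      simp [chunksFrom, optWrap, h2]
    rw [hch, joinSep_concat, if_pos h2]
    refine popTrail_of_last_ne _ ?_
    rw [List.getLast?_append_of_ne_nil _ h2]
    intro hc
    exact inv.2 "" (List.mem_of_getLast? hc) rfl

-- B's runs fold = runsC
theorem foldB_eq : ∀ (ls : List String) (R : List (List String)) (run : List String),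
    ls.foldl gB (R, run) = (R ++ (runsC ls run).1, (runsC ls run).2) := by
  intro ls
  induction ls with
  | nil => intro R run; simp [runsC]
  | cons l ls ih =>
    intro R run
    rw [List.foldl_cons]
    by_cases hl : l = ""
    · by_cases hr : run = []
      · rw [show gB (R, run) l = (R, run) from by simp [gB, hl, hr]]
        rw [ih]
        simp [runsC, hl, hr]
      · rw [show gB (R, run) l = (R ++ [run], []) from by simp [gB, hl, hr]]
        rw [ih]
        simp [runsC, hl, hr]
    · rw [show gB (R, run) l = (R, run ++ [l]) from by simp [gB, hl]]
      rw [ih]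
      simp [runsC, hl]

-- runs are nonempty and blank-free
theorem runsC_inv : ∀ (ls run : List String), (∀ x ∈ run, x ≠ "") →
    ((∀ c ∈ (runsC ls run).1, c ≠ [] ∧ ∀ x ∈ c, x ≠ "") ∧ ∀ x ∈ (runsC ls run).2, x ≠ "") := by
  intro ls
  induction ls with
  | nil => intro run h; simpa [runsC] using h
  | cons l ls ih =>
    intro run h
    by_cases hl : l = ""
    · by_cases hr : run = []
      · simpa [runsC, hl, hr] using ih run h
      · have hrec := ih [] (by simp)
        have e1 : (runsC (l :: ls) run).1 = run :: (runsC ls []).1 := by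
          simp [runsC, hl, hr]
        have e2 : (runsC (l :: ls) run).2 = (runsC ls []).2 := by
          simp [runsC, hl, hr]
        rw [e1, e2]
        refine ⟨?_, hrec.2⟩
        intro c hcm
        rcases List.mem_cons.1 hcm with rfl | hm
        · exact ⟨hr, h⟩
        · exact hrec.1 c hm
    · have hrun : ∀ x ∈ run ++ [l], x ≠ "" := by
        intro x hx; rcases List.mem_append.1 hx with h1 | h1
        · exact h x h1
        · simp at h1; simpa [h1] using hl
      simpa [runsC, hl] using ih (run ++ [l]) hrun

theorem altChunkRun_small (step : Nat) (x : List String) (h : x.length ≤ step) :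
    altChunkRun step x = [x] := by
  rw [altChunkRun]; simp [h]

theorem sl_append (step : Nat) : ∀ (m : Nat) (f t : List String), f.length = m →
    step ∣ f.length → sl step (f ++ t) = sl step f ++ sl step t := by
  intro m
  induction m using Nat.strong_induction_on with
  | _ m ih =>
    intro f t hm hd
    by_cases hf : f = []
    · simp [hf, sl]
    · by_cases hT : t = []
      · simp [hT, sl]
      · have hstep : 1 ≤ step := by
          rcases Nat.eq_zero_or_pos step with h0 | h1
          · subst h0; rw [Nat.zero_dvd] at hd
            exact absurd (List.eq_nil_of_length_eq_zero hd) hf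
          · exact h1
        have hlen : step ≤ f.length := Nat.le_of_dvd (by simpa [List.length_pos_iff] using hf) hd
        have hft : f ++ t ≠ [] := by simp [hf]
        have htlen : 1 ≤ t.length := by
          simpa [Nat.one_le_iff_ne_zero, List.length_eq_zero_iff] using hT
        have hgt : ¬ ((f ++ t).length ≤ step ∨ step = 0) := by
          push_neg
          exact ⟨by simp only [List.length_append]; omega, by omega⟩
        rw [sl, if_neg hft, altChunkRun, if_neg hgt,
            List.take_append_of_le_length hlen, List.drop_append_of_le_length hlen]
        by_cases heq : f.length = step
        · have hdrop : f.drop step = [] := by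
            apply List.eq_nil_of_length_eq_zero; simp [heq]
          rw [hdrop, List.nil_append, List.take_of_length_le (le_of_eq heq)]
          rw [show sl step f = [f] from by
                rw [sl, if_neg hf, altChunkRun_small step f (le_of_eq heq)]]
          rw [show sl step t = altChunkRun step t from by rw [sl, if_neg hT]]
          simp
        · have hlt : step < f.length := by omega
          have hdne : f.drop step ≠ [] := by
            intro hcontra
            have := congrArg List.length hcontra
            simp at this
            omega
          have hdd : step ∣ (f.drop step).length := by
            simp only [List.length_drop]
            exact Nat.dvd_sub hd (Nat.dvd_refl step)
          have ihe := ih (f.drop step).length (by simp; omega) (f.drop step) t rfl hdd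
          rw [show altChunkRun step (f.drop step ++ t) = sl step (f.drop step) ++ sl step t from by
                rw [← ihe, sl, if_neg (by simp [hdne])]]
          rw [show sl step f = f.take step :: altChunkRun step (f.drop step) from by
                rw [sl, if_neg hf, altChunkRun, if_neg (by push_neg; exact ⟨by omega, by omega⟩)]]
          rw [show sl step (f.drop step) = altChunkRun step (f.drop step) from by
                rw [sl, if_neg hdne]]
          simp

-- A's flush condition, under the pending-chunk invariant, fires exactly at step boundary
theorem cond_iff (n : Int) (cur : List String) (h : cur.length < stepOf n) :
    (((cur.length : Int) + 1 ≥ n)) ↔ cur.length + 1 = stepOf n := by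
  unfold stepOf at *
  by_cases hn : n > 1
  · rw [if_pos hn] at h ⊢; omega
  · rw [if_neg hn] at h ⊢; omega

-- crux: A's on-the-fly chunking = B's run-slicing, aligned by a flushed prefix f
theorem align (n : Int) : ∀ (ls f cur : List String), stepOf n ∣ f.length →
    cur.length < stepOf n →
    (runsFrom ls (f ++ cur)).flatMap (sl (stepOf n)) = sl (stepOf n) f ++ chunksFrom n ls cur := by
  intro ls
  induction ls with
  | nil =>
    intro f cur hd hc
    simp only [runsFrom, runsC, chunksFrom, loopC, List.nil_append, optWrap]
    by_cases hfc : f ++ cur = []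
    · have hf : f = [] := (List.append_eq_nil_iff.1 hfc).1
      have hcr : cur = [] := (List.append_eq_nil_iff.1 hfc).2
      simp [hf, hcr, sl]
    · rw [if_neg hfc]
      simp only [List.flatMap_cons, List.flatMap_nil, List.append_nil]
      rw [sl_append (stepOf n) f.length f cur rfl hd]
      by_cases hcr : cur = []
      · simp [hcr, sl]
      · simp [hcr, sl, altChunkRun_small (stepOf n) cur (by omega)]
  | cons l ls ih =>
    intro f cur hd hc
    by_cases hl : l = ""
    · subst hl
      by_cases hfc : f ++ cur = []
      · have hf : f = [] := (List.append_eq_nil_iff.1 hfc).1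
        have hcr : cur = [] := (List.append_eq_nil_iff.1 hfc).2
        subst hf; subst hcr
        have hrw : runsFrom ("" :: ls) ([] ++ []) = runsFrom ls [] := by
          simp [runsFrom, runsC]
        have hcw : chunksFrom n ("" :: ls) [] = chunksFrom n ls [] := by
          simp [chunksFrom, loopC]
        rw [hrw, hcw]
        simpa using ih [] [] (by simp) (by simpa using stepOf_pos n)
      · have hruns : runsFrom ("" :: ls) (f ++ cur) = (f ++ cur) :: runsFrom ls [] := by
          simp [runsFrom, runsC, hfc, optWrap]
        rw [hruns]
        simp only [List.flatMap_cons]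
        have ihe := ih [] [] (by simp) (by simpa using stepOf_pos n)
        simp only [List.nil_append, sl, if_pos rfl] at ihe
        rw [show (runsFrom ls []).flatMap (sl (stepOf n)) = chunksFrom n ls [] from by
              simpa using ihe]
        rw [sl_append (stepOf n) f.length f cur rfl hd]
        by_cases hcr : cur = []
        · subst hcr
          have hcf : chunksFrom n ("" :: ls) [] = chunksFrom n ls [] := by
            simp [chunksFrom, loopC]
          rw [hcf]
          simp [sl]
        · have hcf : chunksFrom n ("" :: ls) cur = cur :: chunksFrom n ls [] := by
            simp [chunksFrom, loopC, hcr]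
          rw [hcf]
          simp [sl, hcr, altChunkRun_small (stepOf n) cur (by omega)]
    · have hrstep : runsFrom (l :: ls) (f ++ cur) = runsFrom ls (f ++ cur ++ [l]) := by
        simp [runsFrom, runsC, hl]
      rw [hrstep]
      by_cases hT : ((cur.length : Int) + 1 ≥ n)
      · have heq : cur.length + 1 = stepOf n := (cond_iff n cur hc).1 hT
        have hdvd : stepOf n ∣ (f ++ (cur ++ [l])).length := by
          simp only [List.length_append, List.length_cons, List.length_nil]
          have : (cur ++ [l]).length = stepOf n := by simp; omega
          simp only [List.length_append] at this
          exact Nat.dvd_add hd (this ▸ Nat.dvd_refl _)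
        have ihe := ih (f ++ (cur ++ [l])) [] hdvd (by simpa using stepOf_pos n)
        rw [List.append_nil] at ihe
        rw [List.append_assoc f cur [l], ihe]
        have hchunk : chunksFrom n (l :: ls) cur = (cur ++ [l]) :: chunksFrom n ls [] := by
          simp only [chunksFrom, loopC, if_neg hl]
          rw [if_pos hT]
          simp
        rw [hchunk]
        rw [sl_append (stepOf n) f.length f (cur ++ [l]) rfl hd]
        rw [show sl (stepOf n) (cur ++ [l]) = [cur ++ [l]] from by
              rw [sl, if_neg (by simp), altChunkRun_small (stepOf n) (cur ++ [l]) (by simp; omega)]]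
        simp
      · have hne : ¬ (cur.length + 1 = stepOf n) := fun he => hT ((cond_iff n cur hc).2 he)
        have hlt : (cur ++ [l]).length < stepOf n := by
          simp only [List.length_append, List.length_cons, List.length_nil]
          omega
        have ihe := ih f (cur ++ [l]) hd hlt
        rw [← List.append_assoc] at ihe
        rw [ihe]
        have hchunk : chunksFrom n (l :: ls) cur = chunksFrom n ls (cur ++ [l]) := by
          simp only [chunksFrom, loopC, if_neg hl]
          rw [if_neg hT]
        rw [hchunk]

-- B's join fold = joinSep
theorem foldJoin_aux : ∀ (cs : List (List String)) (out : List String), out ≠ [] →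
    cs.foldl joinF out = out ++ cs.flatMap (fun d => "" :: d) := by
  intro cs
  induction cs with
  | nil => intro out _; simp
  | cons c cs ih =>
    intro out hout
    rw [List.foldl_cons, show joinF out c = out ++ [""] ++ c from by simp [joinF, hout]]
    rw [ih (out ++ [""] ++ c) (by simp)]
    simp [List.flatMap_cons]

theorem foldJoin_eq (cs : List (List String)) (h : ∀ c ∈ cs, c ≠ []) :
    cs.foldl joinF [] = joinSep cs := by
  cases cs with
  | nil => simp [joinSep]
  | cons c cs =>
    have hc : c ≠ [] := h c (by simp)
    rw [List.foldl_cons, show joinF [] c = c from by simp [joinF]]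
    rw [foldJoin_aux cs c hc]
    rfl

theorem flatMap_sl_eq (step : Nat) (rs : List (List String)) (h : ∀ r ∈ rs, r ≠ []) :
    rs.flatMap (sl step) = rs.flatMap (altChunkRun step) := by
  induction rs with
  | nil => simp
  | cons r rs ih =>
    simp only [List.flatMap_cons]
    rw [sl, if_neg (h r (by simp)), ih (fun r hr => h r (by simp [hr]))]

-- main equality
theorem AB_eq (lines : List String) (n : Int) :
    chunked_forward_lines lines n = chunked_forward_lines_alt lines n := by
  by_cases h : lines = []
  · subst h; rfl
  · rw [A_char lines n h]
    unfold chunked_forward_lines_alt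
    rw [foldB_eq lines [] []]
    simp only [List.nil_append]
    have hstep : (if n > 1 then n.toNat else 1) = stepOf n := rfl
    rw [hstep]
    have hruns : (if (runsC lines []).2 ≠ [] then (runsC lines []).1 ++ [(runsC lines []).2]
        else (runsC lines []).1) = runsFrom lines [] := by
      unfold runsFrom optWrap
      by_cases h2 : (runsC lines []).2 = [] <;> simp [h2]
    rw [hruns]
    rw [PySem.List.foldl_append_eq_flatMap, List.nil_append]
    have hrinv := runsC_inv lines [] (by simp)
    have hrne : ∀ r ∈ runsFrom lines [], r ≠ [] := by
      intro r hr
      unfold runsFrom at hr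
      rcases List.mem_append.1 hr with h1 | h1
      · exact (hrinv.1 r h1).1
      · unfold optWrap at h1
        split at h1
        · simp at h1
        · simp at h1; subst h1; assumption
    rw [← flatMap_sl_eq (stepOf n) _ hrne]
    have halign := align n lines [] [] (by simp) (by simpa using stepOf_pos n)
    simp only [List.append_nil] at halign
    rw [halign]
    rw [show sl (stepOf n) [] = [] from by rw [sl, if_pos rfl]]
    rw [List.nil_append]
    have hcinv := loopC_inv n lines [] (by simp)
    have hcne : ∀ c ∈ chunksFrom n lines [], c ≠ [] := by
      intro c hc
      unfold chunksFrom at hc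
      rcases List.mem_append.1 hc with h1 | h1
      · exact (hcinv.1 c h1).1
      · unfold optWrap at h1
        split at h1
        · simp at h1
        · simp at h1; subst h1; assumption
    rw [foldJoin_eq _ hcne]

-- ===== VERDICT (by name: the statement is the Claim_ definition above) =====
theorem chunked_forward_lines_spec : Claim_equal_chunked_forward_lines := by
  intro lines chunk_size _
  exact AB_eq lines chunk_size
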